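-- pv_equiv track=rewrite | github.com/song7351/-algorithm_study | 1.이코테/1.greedy/Q6.py | solution
-- ===== SOURCE A (Python) =====
-- def solution(food_times, k):
--     if sum(food_times) <= k:
--         return -1
--
--     answer = 0
--     N = len(food_times)
--     # K초 흐른다.
--     for i in range(1,k+1):
--         if food_times[answer]:
--             food_times[answer] -= 1
--             answer += 1
--         else:
--             while not food_times[answer]:
--                 answer += 1
--                 if answer == N:
--                     answer = 0
--             food_times[answer] -= 1
--             answer += 1
--
--         if answer == N:
--             answer = 0
--
--     # K초가 지난뒤 재시작 지점 idx = answer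
--     while not food_times[answer]:
--         answer += 1
--         if answer == N:
--             answer = 0
--
--     answer += 1
--     if answer == N+1:
--         answer = 1
--
--     return answer
-- ===== SOURCE B (Python) =====
-- def solution(food_times, k):
--     # Round-wise simulation instead of A's second-by-second pointer walk; does not
--     # mutate food_times (A empties its argument in place; only the return value is compared).
--     if sum(food_times) <= k:
--         return -1
--     plates = list(food_times)
--     while True:
--         active = [j for j, v in enumerate(plates) if v != 0]
--         if k < len(active):
--             return active[k] + 1
--         k -= len(active)
--         plates = [v - 1 if v else v for v in plates]
-- ===== Notes on version B (the rewrite author's own statement) =====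
-- stated objective: simpler
-- what changed: A walks a wrap-around pointer one second at a time (k iterations with an inner zero-skipping scan); B simulates whole rounds: it recomputes the list of non-empty plates once per round, answers by direct indexing into that list when fewer seconds than plates remain, and otherwise decrements every non-empty plate at once -- no pointer, no per-second loop, and it does not mutate its argument (A empties food_times in place; only the return value is compared).
-- outside the precondition, e.g. on solution([1, 2], -1): A returns 1, B returns 2; on solution([3], -2): A returns 1, B raises IndexError
import Mathlib
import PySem

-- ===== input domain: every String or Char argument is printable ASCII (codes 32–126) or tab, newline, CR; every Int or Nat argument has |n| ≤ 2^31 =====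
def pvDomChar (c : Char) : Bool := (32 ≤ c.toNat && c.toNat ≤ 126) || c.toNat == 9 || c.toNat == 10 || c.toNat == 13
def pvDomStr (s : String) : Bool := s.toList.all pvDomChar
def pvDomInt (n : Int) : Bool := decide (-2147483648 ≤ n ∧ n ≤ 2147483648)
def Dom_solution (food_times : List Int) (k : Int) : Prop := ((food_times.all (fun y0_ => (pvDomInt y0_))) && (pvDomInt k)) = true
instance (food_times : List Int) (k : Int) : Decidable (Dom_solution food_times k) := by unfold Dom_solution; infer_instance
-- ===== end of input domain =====

-- B replaces A's second-by-second pointer walk by a round-wise simulation (simpler: no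
-- pointer, no inner zero-skipping scan); A mutates food_times in place, B does not —
-- the equivalence proved here is about the return value only.

-- ===== PORT A =====
-- `while not food_times[answer]: answer += 1; if answer == N: answer = 0`
-- (fuel-bounded guard: on admitted inputs the scan stops within lst.length steps; the
--  out-of-range default 1 of pyGetD is never read on admitted inputs)
def aWhile (lst : List Int) (N : Int) : Int → Nat → Int
  | ans, 0 => ans
  | ans, fuel+1 =>
    if PySem.List.pyGetD lst ans 1 = 0 then
      aWhile lst N (if ans + 1 = N then 0 else ans + 1) fuel
    else ans

-- the body of `for i in range(1, k+1)`: one second of eating, then the wrap check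
def aLoop (N : Int) : List Int × Int → Nat → List Int × Int
  | s, 0 => s
  | (lst, ans), fuel+1 =>
    let s' :=
      if PySem.List.pyGetD lst ans 1 ≠ 0 then
        (PySem.List.pySetD lst ans (PySem.List.pyGetD lst ans 1 - 1), ans + 1)
      else
        let a2 := aWhile lst N ans (lst.length + 1)
        (PySem.List.pySetD lst a2 (PySem.List.pyGetD lst a2 1 - 1), a2 + 1)
    aLoop N (s'.1, if s'.2 = N then 0 else s'.2) fuel

def solution (food_times : List Int) (k : Int) : Int :=
  if food_times.sum ≤ k then -1
  else
    let N : Int := food_times.length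
    let s := aLoop N (food_times, 0) k.toNat
    let ans2 := aWhile s.1 N s.2 (s.1.length + 1)
    if ans2 + 1 = N + 1 then 1 else ans2 + 1

-- ===== PORT B =====
-- the `while True` round loop (fuel-bounded guard: each round consumes at least one
-- second, so on admitted inputs it returns after at most k+1 rounds)
def bRound : Nat → List Int → Int → Int
  | 0, _, _ => 0
  | fuel+1, plates, k =>
    let active := ((PySem.List.enumerate plates 0).filter (fun x => x.2 ≠ 0)).map (fun x => x.1)
    if k < (active.length : Int) then PySem.List.pyGetD active k 0 + 1
    else bRound fuel (plates.map (fun v => if v ≠ 0 then v - 1 else v)) (k - active.length)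

def solution_alt (food_times : List Int) (k : Int) : Int :=
  if food_times.sum ≤ k then -1
  else bRound (2 * k.toNat + 2) food_times k

-- ===== PRECONDITION & SPEC =====
-- Pre_ excludes only negative k: negative elapsed time is outside the problem's natural
-- domain, and there A's no-op simulation and B's negative list indexing disagree
-- (A also raises or loops forever on some of those inputs).
def Pre_solution (food_times : List Int) (k : Int) : Prop := 0 ≤ k
instance (food_times : List Int) (k : Int) : Decidable (Pre_solution food_times k) := by unfold Pre_solution; infer_instance
def pvWitness_solution : List Int × Int := ([3, 1, 2], 5)

def Spec_solution (food_times : List Int) (k : Int) (out : Int) : Prop := out = solution_alt food_times k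
instance (food_times : List Int) (k : Int) (out : Int) : Decidable (Spec_solution food_times k out) := by unfold Spec_solution; infer_instance

-- ===== CLAIM (what is proved, stated in full; the proofs are below) =====
def Claim_equal_solution : Prop := ∀ (food_times : List Int) (k : Int), Dom_solution food_times k → Pre_solution food_times k → Spec_solution food_times k (solution food_times k)

-- ===== LEMMAS AND PROOFS =====

-- indices (counted from s) of the non-zero entries of a list
def nz : List Int → Nat → List Nat
  | [], _ => []
  | v :: t, s => if v = 0 then nz t (s + 1) else s :: nz t (s + 1)

-- one full round of eating, applied to the plates from position p on
def decFrom (lst : List Int) (p : Nat) : List Int :=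
  lst.take p ++ (lst.drop p).map (fun v => if v ≠ 0 then v - 1 else v)

-- reference recursion: round-wise answer computation from a mid-round state (lst, p)
def gres : Nat → List Int → Nat → Int → Int
  | 0, _, _, _ => 0
  | f+1, lst, p, k =>
    let a := nz (lst.drop p) p
    if k < (a.length : Int) then PySem.List.pyGetD (a.map (fun (j : Nat) => (j : Int))) k 0 + 1
    else gres f (decFrom lst p) 0 (k - a.length)

-- A's loop followed by A's final scan and 1-based conversion, from a mid-round state
def aRun (lst : List Int) (p : Int) (kn : Nat) : Int :=
  let s := aLoop (lst.length : Int) (lst, p) kn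
  let a2 := aWhile s.1 (lst.length : Int) s.2 (s.1.length + 1)
  if a2 + 1 = (lst.length : Int) + 1 then 1 else a2 + 1

-- invariant: kn more seconds of eating never exhaust the food
def INV (lst : List Int) (k : Int) : Prop :=
  0 ≤ k ∧ ((∃ v ∈ lst, v < 0) ∨ ((∀ v ∈ lst, 0 ≤ v) ∧ k < lst.sum))

theorem solution_eq_aRun (food_times : List Int) (k : Int) (h : ¬ food_times.sum ≤ k) :
    solution food_times k = aRun food_times 0 k.toNat := by
  simp [solution, aRun, h]

theorem mem_nz {l : List Int} {s q : Nat} (h : q ∈ nz l s) :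
    s ≤ q ∧ q < s + l.length ∧ l.getD (q - s) 0 ≠ 0 := by
  induction l generalizing s with
  | nil => simp [nz] at h
  | cons v t ih =>
    by_cases hv : v = 0
    · simp only [nz, if_pos hv] at h
      rcases ih h with ⟨h1, h2, h3⟩
      refine ⟨by omega, by simp; omega, ?_⟩
      have he : q - s = (q - (s+1)) + 1 := by omega
      simpa [he] using h3
    · simp only [nz, if_neg hv, List.mem_cons] at h
      rcases h with h | h
      · subst h; simp [hv]
      · rcases ih h with ⟨h1, h2, h3⟩
        refine ⟨by omega, by simp; omega, ?_⟩
        have he : q - s = (q - (s+1)) + 1 := by omega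
        simpa [he] using h3

theorem nz_eq_nil_iff (l : List Int) (s : Nat) : nz l s = [] ↔ ∀ v ∈ l, v = 0 := by
  induction l generalizing s with
  | nil => simp [nz]
  | cons v t ih =>
    by_cases hv : v = 0 <;> simp [nz, hv, ih]

theorem getD_drop (l : List Int) (p q : Nat) (hpq : p ≤ q) (hq : q < l.length) :
    (l.drop p).getD (q - p) 0 = l.getD q 0 := by
  rw [List.getD_eq_getElem _ _ (by simp [List.length_drop]; omega),
      List.getD_eq_getElem _ _ hq, List.getElem_drop]
  simp only [show p + (q - p) = q by omega]

theorem nz_head (l : List Int) : ∀ (d p q : Nat) (rest : List Nat), l.length ≤ p + d →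
    nz (l.drop p) p = q :: rest → rest = nz (l.drop (q+1)) (q+1) := by
  intro d
  induction d with
  | zero =>
    intro p q rest hd h
    rw [List.drop_eq_nil_of_le (by omega)] at h
    simp [nz] at h
  | succ d ih =>
    intro p q rest hd h
    by_cases hp : p < l.length
    · rw [List.drop_eq_getElem_cons hp] at h
      by_cases h0 : l[p] = 0
      · simp only [nz, if_pos h0] at h
        exact ih (p+1) q rest (by omega) h
      · simp only [nz, if_neg h0, List.cons.injEq] at h
        obtain ⟨rfl, hrest⟩ := h
        exact hrest.symm
    · rw [List.drop_eq_nil_of_le (by omega)] at h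
      simp [nz] at h

theorem decFrom_step (l : List Int) (p : Nat) (hp : p < l.length) (h0 : l[p] = 0) :
    decFrom l p = decFrom l (p+1) := by
  unfold decFrom
  rw [List.drop_eq_getElem_cons hp, List.map_cons, List.take_succ]
  simp [h0, List.getElem?_eq_getElem hp, List.append_assoc]


theorem getD_map_natCast (xs : List Nat) (n : Nat) :
    (xs.map (fun (j : Nat) => (j : Int))).getD n 0 = ((xs.getD n 0 : Nat) : Int) := by
  unfold List.getD
  rw [List.getElem?_map]
  cases xs[n]? <;> simp

theorem take_append_cons_succ {a : Type} (A : List a) (x : a) (B : List a) :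
    (A ++ x :: B).take (A.length + 1) = A ++ [x] := by
  rw [List.take_append, List.take_of_length_le (by omega)]
  simp [show A.length + 1 - A.length = 1 by omega]

theorem drop_append_cons_succ {a : Type} (A : List a) (x : a) (B : List a) :
    (A ++ x :: B).drop (A.length + 1) = B := by
  rw [List.drop_append, List.drop_eq_nil_of_le (by omega)]
  simp [show A.length + 1 - A.length = 1 by omega]

theorem decompD (l : List Int) : ∀ (d p q : Nat) (rest : List Nat), l.length ≤ p + d →
    nz (l.drop p) p = q :: rest →
    decFrom l p = decFrom (l.set q (l.getD q 0 - 1)) (q+1) := by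
  intro d
  induction d with
  | zero =>
    intro p q rest hd h
    rw [List.drop_eq_nil_of_le (by omega)] at h
    simp [nz] at h
  | succ d ih =>
    intro p q rest hd h
    by_cases hp : p < l.length
    · rw [List.drop_eq_getElem_cons hp] at h
      by_cases h0 : l[p] = 0
      · simp only [nz, if_pos h0] at h
        rw [decFrom_step l p hp h0]
        exact ih (p+1) q rest (by omega) h
      · simp only [nz, if_neg h0, List.cons.injEq] at h
        obtain ⟨rfl, hrest⟩ := h
        have hset : l.set p (l.getD p 0 - 1) = l.take p ++ (l.getD p 0 - 1) :: l.drop (p+1) := by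
          rw [List.set_eq_take_append_cons_drop, if_pos hp]
        have hlt : (l.take p).length = p := by simp [List.length_take]; omega
        have h2 : (l.take p ++ (l.getD p 0 - 1) :: l.drop (p+1)).take (p+1)
            = l.take p ++ [l.getD p 0 - 1] := by
          rw [show p + 1 = (l.take p).length + 1 by omega]
          exact take_append_cons_succ _ _ _
        have h3 : (l.take p ++ (l.getD p 0 - 1) :: l.drop (p+1)).drop (p+1) = l.drop (p+1) := by
          rw [show p + 1 = (l.take p).length + 1 by omega]
          exact drop_append_cons_succ _ _ _
        unfold decFrom
        rw [hset, h2, h3]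
        rw [List.drop_eq_getElem_cons hp, List.map_cons]
        rw [List.getD_eq_getElem l 0 hp]
        simp [h0, List.append_assoc]
    · rw [List.drop_eq_nil_of_le (by omega)] at h
      simp [nz] at h

theorem decFrom_allzero (l : List Int) (p : Nat) (hall : ∀ v ∈ l.drop p, v = 0) :
    decFrom l p = l := by
  unfold decFrom
  rw [List.map_congr_left (g := id) (fun a ha => by simp [hall a ha]), List.map_id,
      List.take_append_drop]

theorem decFrom_length (l : List Int) : decFrom l l.length = l := by
  simp [decFrom]

theorem decFrom_zero (l : List Int) :
    decFrom l 0 = l.map (fun v => if v ≠ 0 then v - 1 else v) := by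
  simp [decFrom]

theorem S1 (l : List Int) : ∀ (fuel p q : Nat) (rest : List Nat),
    p ≤ l.length → nz (l.drop p) p = q :: rest → q + 1 - p ≤ fuel →
    aWhile l (l.length : Int) (p : Int) fuel = (q : Int) := by
  intro fuel
  induction fuel with
  | zero =>
    intro p q rest hp h hf
    have hq := mem_nz (show q ∈ nz (l.drop p) p by rw [h]; exact List.mem_cons_self)
    omega
  | succ fuel ih =>
    intro p q rest hp h hf
    by_cases hpl : p < l.length
    · rw [List.drop_eq_getElem_cons hpl] at h
      by_cases h0 : l[p] = 0
      · simp only [nz, if_pos h0] at h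
        have hq := mem_nz (show q ∈ nz (l.drop (p+1)) (p+1) by rw [h]; exact List.mem_cons_self)
        have hc : PySem.List.pyGetD l (p : Int) 1 = 0 := by
          rw [PySem.List.pyGetD_natCast, List.getD_eq_getElem l 1 hpl]; exact h0
        rw [aWhile, if_pos hc]
        have hpe : p + 1 ≠ l.length := by
          intro he
          rw [List.drop_eq_nil_of_le (by omega)] at h
          simp [nz] at h
        rw [if_neg (by exact_mod_cast fun hc => hpe (by exact_mod_cast hc))]
        rw [show ((p : Int) + 1) = ((p + 1 : Nat) : Int) by push_cast; ring]
        exact ih (p+1) q rest (by omega) h (by omega)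
      · simp only [nz, if_neg h0, List.cons.injEq] at h
        obtain ⟨rfl, -⟩ := h
        have hc : PySem.List.pyGetD l (p : Int) 1 ≠ 0 := by
          rw [PySem.List.pyGetD_natCast, List.getD_eq_getElem l 1 hpl]; exact h0
        rw [aWhile, if_neg hc]
    · rw [List.drop_eq_nil_of_le (by omega)] at h
      simp [nz] at h

theorem S2 (l : List Int) : ∀ (fuel p q : Nat) (rest : List Nat),
    p < l.length → nz (l.drop p) p = [] → nz l 0 = q :: rest →
    (l.length - p) + (q + 1) ≤ fuel →
    aWhile l (l.length : Int) (p : Int) fuel = (q : Int) := by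
  intro fuel
  induction fuel with
  | zero => intro p q rest hp he h hf; omega
  | succ fuel ih =>
    intro p q rest hp he h hf
    have hall := (nz_eq_nil_iff _ _).mp he
    have h0 : l[p] = 0 := by
      apply hall
      rw [List.drop_eq_getElem_cons hp]; exact List.mem_cons_self
    have hc : PySem.List.pyGetD l (p : Int) 1 = 0 := by
      rw [PySem.List.pyGetD_natCast, List.getD_eq_getElem l 1 hp]; exact h0
    rw [aWhile, if_pos hc]
    by_cases hpe : p + 1 = l.length
    · rw [if_pos (by exact_mod_cast hpe)]
      rw [show (0 : Int) = ((0 : Nat) : Int) by simp]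
      exact S1 l fuel 0 q rest (by omega) (by simpa using h) (by omega)
    · rw [if_neg (by exact_mod_cast fun hc => hpe (by exact_mod_cast hc))]
      rw [show ((p : Int) + 1) = ((p + 1 : Nat) : Int) by push_cast; ring]
      have he' : nz (l.drop (p+1)) (p+1) = [] := by
        rw [nz_eq_nil_iff]
        intro v hv
        exact hall v (by rw [show p + 1 = p + 1 by rfl] at hv; exact List.mem_of_mem_drop (by rw [← List.drop_drop] at hv; exact hv))
      have hpl1 : p + 1 < l.length := by omega
      exact ih (p+1) q rest hpl1 he' h (by omega)

theorem head_lt (l : List Int) (p q : Nat) (rest : List Nat)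
    (he : nz (l.drop p) p = []) (h : nz l 0 = q :: rest) : q < p := by
  have hq := mem_nz (show q ∈ nz l 0 by rw [h]; exact List.mem_cons_self)
  by_contra hle
  push_neg at hle
  have hall := (nz_eq_nil_iff _ _).mp he
  have hql : q < l.length := by omega
  have hmem : l.getD q 0 ∈ l.drop p := by
    rw [← getD_drop l p q hle hql]
    rw [List.getD_eq_getElem _ _ (by simp [List.length_drop]; omega)]
    exact List.getElem_mem _
  exact hq.2.2 (by simpa using hall _ hmem)

theorem T1 (l : List Int) (p q : Nat) (rest : List Nat) (kn : Nat)
    (hp : p < l.length) (h : nz (l.drop p) p = q :: rest) :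
    aLoop (l.length : Int) (l, (p : Int)) (kn+1)
      = aLoop (l.length : Int) (l.set q (l.getD q 0 - 1), ((if q + 1 = l.length then 0 else q + 1 : Nat) : Int)) kn := by
  have hq := mem_nz (show q ∈ nz (l.drop p) p by rw [h]; exact List.mem_cons_self)
  have hql : q < l.length := by
    have := hq.2.1; simp [List.length_drop] at this; omega
  rw [aLoop]
  rw [List.drop_eq_getElem_cons hp] at h
  by_cases h0 : l[p] = 0
  · have hc : ¬ PySem.List.pyGetD l (p : Int) 1 ≠ 0 := by
      rw [PySem.List.pyGetD_natCast, List.getD_eq_getElem l 1 hp]; simpa using h0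
    simp only [if_neg hc]
    have hscan : aWhile l (l.length : Int) (p : Int) (l.length + 1) = (q : Int) := by
      apply S1 l (l.length + 1) p q rest (by omega) _ (by omega)
      rw [List.drop_eq_getElem_cons hp]; exact h
    rw [hscan]
    rw [PySem.List.pySetD_natCast, PySem.List.pyGetD_natCast,
        List.getD_eq_getElem l 1 hql, ← List.getD_eq_getElem l 0 hql]
    congr 1
    by_cases hw : q + 1 = l.length
    · rw [if_pos hw, if_pos (by exact_mod_cast hw)]; simp
    · rw [if_neg hw, if_neg (by exact_mod_cast fun hc => hw (by exact_mod_cast hc))]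
      push_cast; ring_nf
  · simp only [nz, if_neg h0, List.cons.injEq] at h
    obtain ⟨rfl, -⟩ := h
    have hc : PySem.List.pyGetD l (p : Int) 1 ≠ 0 := by
      rw [PySem.List.pyGetD_natCast, List.getD_eq_getElem l 1 hp]; exact h0
    simp only [if_pos hc]
    rw [PySem.List.pySetD_natCast, PySem.List.pyGetD_natCast,
        List.getD_eq_getElem l 1 hp, ← List.getD_eq_getElem l 0 hp]
    congr 1
    by_cases hw : p + 1 = l.length
    · rw [if_pos hw, if_pos (by exact_mod_cast hw)]; simp
    · rw [if_neg hw, if_neg (by exact_mod_cast fun hc => hw (by exact_mod_cast hc))]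
      push_cast; ring_nf

theorem T1w (l : List Int) (p q : Nat) (rest : List Nat) (kn : Nat)
    (hp : p < l.length) (he : nz (l.drop p) p = []) (h : nz l 0 = q :: rest) :
    aLoop (l.length : Int) (l, (p : Int)) (kn+1)
      = aLoop (l.length : Int) (l.set q (l.getD q 0 - 1), ((if q + 1 = l.length then 0 else q + 1 : Nat) : Int)) kn := by
  have hq := mem_nz (show q ∈ nz l 0 by rw [h]; exact List.mem_cons_self)
  have hql : q < l.length := by omega
  have hqp : q < p := head_lt l p q rest he h
  have hall := (nz_eq_nil_iff _ _).mp he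
  have h0 : l[p] = 0 := by
    apply hall
    rw [List.drop_eq_getElem_cons hp]; exact List.mem_cons_self
  rw [aLoop]
  have hc : ¬ PySem.List.pyGetD l (p : Int) 1 ≠ 0 := by
    rw [PySem.List.pyGetD_natCast, List.getD_eq_getElem l 1 hp]; simpa using h0
  simp only [if_neg hc]
  have hscan : aWhile l (l.length : Int) (p : Int) (l.length + 1) = (q : Int) :=
    S2 l (l.length + 1) p q rest hp he h (by omega)
  rw [hscan]
  rw [PySem.List.pySetD_natCast, PySem.List.pyGetD_natCast,
      List.getD_eq_getElem l 1 hql, ← List.getD_eq_getElem l 0 hql]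
  congr 1
  by_cases hw : q + 1 = l.length
  · rw [if_pos hw, if_pos (by exact_mod_cast hw)]; simp
  · rw [if_neg hw, if_neg (by exact_mod_cast fun hc => hw (by exact_mod_cast hc))]
    push_cast; ring_nf

theorem T1' (l : List Int) (p q : Nat) (rest : List Nat) (kn : Nat)
    (hp : p < l.length) (h : nz (l.drop p) p = q :: rest) :
    aRun l (p : Int) (kn+1)
      = aRun (l.set q (l.getD q 0 - 1)) (((if q + 1 = l.length then 0 else q + 1 : Nat)) : Int) kn := by
  simp only [aRun, List.length_set]
  rw [T1 l p q rest kn hp h]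

theorem T1w' (l : List Int) (p q : Nat) (rest : List Nat) (kn : Nat)
    (hp : p < l.length) (he : nz (l.drop p) p = []) (h : nz l 0 = q :: rest) :
    aRun l (p : Int) (kn+1)
      = aRun (l.set q (l.getD q 0 - 1)) (((if q + 1 = l.length then 0 else q + 1 : Nat)) : Int) kn := by
  simp only [aRun, List.length_set]
  rw [T1w l p q rest kn hp he h]

theorem INV_step (l : List Int) (q : Nat) (kn : Nat)
    (hq : q < l.length) (hnz : l.getD q 0 ≠ 0) (h : INV l ((kn : Int) + 1)) :
    INV (l.set q (l.getD q 0 - 1)) (kn : Int) := by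
  obtain ⟨hk0, h2⟩ := h
  have hgl : l.getD q 0 = l[q] := List.getD_eq_getElem l 0 hq
  have hsplit : l.sum = (l.take q).sum + (l[q] + (l.drop (q+1)).sum) := by
    conv_lhs => rw [← List.take_append_drop q l]
    rw [List.sum_append, List.drop_eq_getElem_cons hq, List.sum_cons]
  have hsum : (l.set q (l.getD q 0 - 1)).sum = l.sum - 1 := by
    rw [List.sum_set, if_pos hq, hgl]
    omega
  refine ⟨by positivity, ?_⟩
  rcases h2 with ⟨v, hv, hneg⟩ | ⟨hpos, hlt⟩
  · left
    obtain ⟨i, hil, hie⟩ := List.getElem_of_mem hv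
    by_cases hiq : i = q
    · refine ⟨l.getD q 0 - 1, ?_, by subst hiq; omega⟩
      have hlen : q < (l.set q (l.getD q 0 - 1)).length := by simpa using hq
      have hmem := List.getElem_mem hlen
      rwa [List.getElem_set_self] at hmem
    · refine ⟨v, ?_, hneg⟩
      have hlen : i < (l.set q (l.getD q 0 - 1)).length := by simpa using hil
      have hmem := List.getElem_mem hlen
      rwa [List.getElem_set_ne (fun hh => hiq hh.symm), hie] at hmem
  · right
    constructor
    · intro v hv
      rcases List.mem_or_eq_of_mem_set hv with hm | rfl
      · exact hpos v hm
      · have := hpos l[q] (List.getElem_mem hq); omega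
    · omega

theorem INV_nz (l : List Int) (k : Int) (h : INV l k) : nz l 0 ≠ [] := by
  intro hnil
  have hall := (nz_eq_nil_iff l 0).mp hnil
  rcases h.2 with ⟨v, hv, hneg⟩ | ⟨-, hlt⟩
  · have := hall v hv; omega
  · have := List.sum_eq_zero hall; have := h.1; omega

-- main lemma: A's walk from a mid-round state equals the round-wise recursion
theorem L1 : ∀ (m kn p : Nat) (l : List Int) (f : Nat),
    2 * kn + (if p = 0 then 0 else 1) ≤ m → p < l.length → INV l (kn : Int) →
    2 * kn + (if p = 0 then 0 else 1) + 2 ≤ f →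
    aRun l (p : Int) kn = gres f l p (kn : Int) := by
  intro m
  induction m using Nat.strong_induction_on with
  | _ m ih =>
    intro kn p l f hm hp hinv hf
    obtain ⟨f', rfl⟩ : ∃ f', f = f' + 1 := ⟨f - 1, by omega⟩
    obtain ⟨q0, rest0, h0⟩ : ∃ q rest, nz l 0 = q :: rest := by
      cases hnz : nz l 0 with
      | nil => exact absurd hnz (INV_nz l _ hinv)
      | cons a b => exact ⟨a, b, rfl⟩
    have hq0 := mem_nz (show q0 ∈ nz l 0 by rw [h0]; exact List.mem_cons_self)
    have hq0l : q0 < l.length := by omega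
    cases ha : nz (l.drop p) p with
    | nil =>
      have hp0 : p ≠ 0 := by
        intro hpe; subst hpe
        rw [List.drop_zero, h0] at ha
        cases ha
      rw [if_neg hp0] at hm hf
      have hq0p : q0 < p := head_lt l p q0 rest0 ha h0
      have hrhs : gres (f'+1) l p (kn : Int) = gres f' l 0 (kn : Int) := by
        simp only [gres, ha, List.length_nil]
        rw [if_neg (by omega)]
        rw [decFrom_allzero l p ((nz_eq_nil_iff _ _).mp ha)]
        simp
      rw [hrhs]
      have hstep : aRun l (p : Int) kn = aRun l ((0 : Nat) : Int) kn := by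
        cases kn with
        | zero =>
          simp only [aRun, aLoop]
          rw [S2 l _ p q0 rest0 hp ha h0 (by omega),
              S1 l _ 0 q0 rest0 (by omega) (by rw [List.drop_zero]; exact h0) (by omega)]
        | succ kn' =>
          rw [T1w' l p q0 rest0 kn' hp ha h0,
              T1' l 0 q0 rest0 kn' (by omega) (by rw [List.drop_zero]; exact h0)]
      rw [hstep]
      exact ih (2 * kn) (by omega) kn 0 l f' (by simp) (by omega) hinv (by simp; omega)
    | cons q rest =>
      have hmemq := mem_nz (show q ∈ nz (l.drop p) p by rw [ha]; exact List.mem_cons_self)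
      have hql : q < l.length := by
        have := hmemq.2.1; simp [List.length_drop] at this; omega
      have hqnz : l.getD q 0 ≠ 0 := by
        rw [← getD_drop l p q hmemq.1 hql]; exact hmemq.2.2
      have hrest : rest = nz (l.drop (q+1)) (q+1) := nz_head l l.length p q rest (by omega) ha
      have hrest2 : nz ((l.set q (l.getD q 0 - 1)).drop (q+1)) (q+1) = rest := by
        rw [List.drop_set, if_pos (by omega)]
        exact hrest.symm
      by_cases hk : kn < rest.length + 1
      · -- fewer seconds left than plates in this round: answer inside this round
        have hrhs : gres (f'+1) l p ((kn : Nat) : Int)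
            = (((q :: rest).getD kn 0 : Nat) : Int) + 1 := by
          simp only [gres, ha, List.length_cons]
          rw [if_pos (by omega)]
          rw [PySem.List.pyGetD_natCast, getD_map_natCast]
        rw [hrhs]
        cases kn with
        | zero =>
          simp only [aRun, aLoop]
          rw [S1 l _ p q rest (by omega) ha (by omega)]
          rw [if_neg (by omega)]
          simp
        | succ kn' =>
          have hq1 : q + 1 ≠ l.length := by
            intro hh
            have hnil : rest = [] := by
              rw [hrest, hh, List.drop_eq_nil_of_le (by omega)]
              simp [nz]
            rw [hnil] at hk
            simp only [List.length_nil] at hk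
            omega
          rw [T1' l p q rest kn' hp ha, if_neg hq1]
          have hcast : ((kn' + 1 : Nat) : Int) = ((kn' : Nat) : Int) + 1 := by push_cast; ring
          have hih := ih (2 * kn' + 1) (by omega) kn' (q+1) (l.set q (l.getD q 0 - 1)) (f'+1)
            (by simp) (by simp only [List.length_set]; omega)
            (INV_step l q kn' hql hqnz (hcast ▸ hinv))
            (by simp; omega)
          rw [hih]
          simp only [gres, hrest2]
          rw [if_pos (by omega)]
          rw [PySem.List.pyGetD_natCast, getD_map_natCast]
          simp
      · -- at least one full round remains: peel one eaten plate off and recurse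
        obtain ⟨kn', rfl⟩ : ∃ kn', kn = kn' + 1 := ⟨kn - 1, by omega⟩
        have hrhs : gres (f'+1) l p ((kn' + 1 : Nat) : Int)
            = gres f' (decFrom l p) 0 (((kn' + 1 : Nat) : Int) - ((rest.length + 1 : Nat) : Int)) := by
          simp only [gres, ha, List.length_cons]
          rw [if_neg (by omega)]
        rw [hrhs]
        have hDD : decFrom l p = decFrom (l.set q (l.getD q 0 - 1)) (q+1) :=
          decompD l l.length p q rest (by omega) ha
        have hcast : ((kn' + 1 : Nat) : Int) = ((kn' : Nat) : Int) + 1 := by push_cast; ring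
        have hinv2 : INV (l.set q (l.getD q 0 - 1)) ((kn' : Nat) : Int) :=
          INV_step l q kn' hql hqnz (hcast ▸ hinv)
        by_cases hq1 : q + 1 = l.length
        · have hrestnil : rest = [] := by
            rw [hrest, hq1, List.drop_eq_nil_of_le (by omega)]
            simp [nz]
          rw [T1' l p q rest kn' hp ha, if_pos hq1]
          have hD2 : decFrom l p = l.set q (l.getD q 0 - 1) := by
            rw [hDD, hq1, show l.length = (l.set q (l.getD q 0 - 1)).length by simp,
                decFrom_length]
          rw [hD2]
          have harith : ((kn' + 1 : Nat) : Int) - ((rest.length + 1 : Nat) : Int) = ((kn' : Nat) : Int) := by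
            rw [hrestnil]; simp only [List.length_nil]; omega
          rw [harith]
          exact ih (2 * kn') (by omega) kn' 0 (l.set q (l.getD q 0 - 1)) f'
            (by simp) (by simp only [List.length_set]; omega) hinv2 (by simp; omega)
        · rw [T1' l p q rest kn' hp ha, if_neg hq1]
          have hih := ih (2 * kn' + 1) (by omega) kn' (q+1) (l.set q (l.getD q 0 - 1)) (f'+1)
            (by simp) (by simp only [List.length_set]; omega) hinv2 (by simp; omega)
          rw [hih]
          simp only [gres, hrest2]
          rw [if_neg (by omega)]
          rw [← hDD]
          congr 1
          omega

theorem enum_filter (plates : List Int) : ∀ (s : Nat),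
    ((PySem.List.enumerate plates (s : Int)).filter (fun x => x.2 ≠ 0)).map (fun x => x.1)
      = (nz plates s).map (fun (j : Nat) => (j : Int)) := by
  induction plates with
  | nil => intro s; simp [PySem.List.enumerate_nil, nz]
  | cons v t ih =>
    intro s
    by_cases hv : v = 0
    · simp only [nz, if_pos hv]
      rw [PySem.List.enumerate_cons, List.filter_cons]
      have hdec : (decide ((((s : Int)), v).2 ≠ 0)) = false := by simp [hv]
      simp only [hdec, Bool.false_eq_true, if_false]
      rw [show ((s : Int) + 1) = ((s + 1 : Nat) : Int) by push_cast; ring]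
      exact ih (s + 1)
    · simp only [nz, if_neg hv]
      rw [PySem.List.enumerate_cons, List.filter_cons]
      have hdec : (decide ((((s : Int)), v).2 ≠ 0)) = true := by simp [hv]
      simp only [hdec, if_true]
      rw [List.map_cons, List.map_cons]
      rw [show ((s : Int) + 1) = ((s + 1 : Nat) : Int) by push_cast; ring]
      rw [ih (s + 1)]

theorem enum_filter0 (plates : List Int) :
    ((PySem.List.enumerate plates 0).filter (fun x => x.2 ≠ 0)).map (fun x => x.1)
      = (nz plates 0).map (fun (j : Nat) => (j : Int)) := by
  have h := enum_filter plates 0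
  simpa using h

theorem L2 (f : Nat) : ∀ (plates : List Int) (k : Int),
    bRound f plates k = gres f plates 0 k := by
  induction f with
  | zero => intro plates k; rfl
  | succ f ih =>
    intro plates k
    simp only [bRound, gres, List.drop_zero]
    rw [enum_filter0, ← decFrom_zero]
    simp only [List.length_map]
    by_cases hcond : k < (((nz plates 0).length : Nat) : Int)
    · rw [if_pos hcond, if_pos hcond]
    · rw [if_neg hcond, if_neg hcond]
      exact ih _ _

-- ===== VERDICT (by name: the statement is the Claim_ definition above) =====
theorem solution_spec : Claim_equal_solution := by
  unfold Claim_equal_solution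
  intro food_times k hdom hpre
  unfold Spec_solution
  by_cases hs : food_times.sum ≤ k
  · simp [solution, solution_alt, hs]
  · have hk0 : 0 ≤ k := hpre
    have hkk : ((k.toNat : Nat) : Int) = k := Int.toNat_of_nonneg hk0
    have hne : food_times ≠ [] := by
      intro h; subst h; simp at hs; omega
    have hlen : 0 < food_times.length := by
      cases food_times with
      | nil => exact absurd rfl hne
      | cons a t => simp
    have hinv : INV food_times ((k.toNat : Nat) : Int) := by
      rw [hkk]
      refine ⟨hk0, ?_⟩
      by_cases hall : ∀ v ∈ food_times, 0 ≤ v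
      · right; exact ⟨hall, by omega⟩
      · left; push_neg at hall; obtain ⟨v, hv, hneg⟩ := hall; exact ⟨v, hv, by omega⟩
    rw [solution_eq_aRun food_times k hs]
    have halt : solution_alt food_times k = gres (2 * k.toNat + 2) food_times 0 k := by
      simp only [solution_alt, if_neg hs]
      exact L2 _ _ _
    rw [halt]
    have hL := L1 (2 * k.toNat) k.toNat 0 food_times (2 * k.toNat + 2)
      (by simp) hlen hinv (by simp)
    rw [hkk] at hL
    simpa using hL
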